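-- pv_equiv track=rewrite | github.com/BenKupernik/Python_Algorithms | Recursive Algorithms.py | stringLengthCounter
-- ===== SOURCE A (Python) =====
-- def stringLengthCounter (aString, length = 0):
--
--     shorterString = ""
--
--     ##Specal case when the string is empty
--     if (aString == ""):
--         pass
--
--     ##shorten the string by one then pass it back to the function
--     else:
--         shorterString = aString[0 :- 1]
--         length = stringLengthCounter(shorterString, length)
--         length += 1 ##for every time the function is called this will increase by 1
--
--     return length
-- ===== SOURCE B (Python) =====
-- def stringLengthCounter(aString, length=0):
--     return length + len(aString)
-- ===== Notes on version B (the rewrite author's own statement) =====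
-- stated objective: faster
-- what changed: Replaces the O(n^2) recursion (one call plus one full-copy slice per character) with the closed form length + len(aString).
import Mathlib
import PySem

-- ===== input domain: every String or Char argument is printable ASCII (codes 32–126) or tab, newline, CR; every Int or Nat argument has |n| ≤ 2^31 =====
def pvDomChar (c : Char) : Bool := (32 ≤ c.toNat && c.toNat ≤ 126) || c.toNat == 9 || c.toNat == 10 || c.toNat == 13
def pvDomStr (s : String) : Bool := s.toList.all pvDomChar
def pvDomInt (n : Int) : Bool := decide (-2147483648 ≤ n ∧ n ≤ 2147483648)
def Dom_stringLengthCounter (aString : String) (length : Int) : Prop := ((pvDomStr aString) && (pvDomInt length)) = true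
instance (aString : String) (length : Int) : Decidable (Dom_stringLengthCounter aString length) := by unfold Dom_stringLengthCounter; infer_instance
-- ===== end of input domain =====

-- B replaces A's O(n^2) per-character recursion (with a full-copy slice each call) by the closed form length + len(aString).
-- ===== PORT A =====
-- A's recursion, on the string's character list; aString[0:-1] is PySem.List.slice s (some 0) (some (-1))
def stringLengthCounterList (s : List Char) (length : Int) : Int :=
  if s = "".toList then length
  else
    let shorterString := PySem.List.slice s (some 0) (some (-1))
    (stringLengthCounterList shorterString length) + 1
termination_by s.length
decreasing_by
  simp only [PySem.List.slice_zero_start, PySem.List.slice_to_neg_one]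
  have hne : s ≠ [] := by simpa using (by assumption : ¬ s = "".toList)
  have h1 : s.dropLast.length = s.length - 1 := List.length_dropLast
  have h2 : 0 < s.length := List.length_pos_iff.mpr hne
  omega

def stringLengthCounter (aString : String) (length : Int) : Int :=
  stringLengthCounterList aString.toList length

-- ===== PORT B =====
def stringLengthCounter_alt (aString : String) (length : Int) : Int :=
  length + PySem.Str.len aString

-- ===== PRECONDITION & SPEC =====
def Spec_stringLengthCounter (aString : String) (length : Int) (out : Int) : Prop := out = stringLengthCounter_alt aString length
instance (aString : String) (length : Int) (out : Int) : Decidable (Spec_stringLengthCounter aString length out) := by unfold Spec_stringLengthCounter; infer_instance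

-- ===== CLAIM (what is proved, stated in full; the proofs are below) =====
def Claim_equal_stringLengthCounter : Prop := ∀ (aString : String) (length : Int), Dom_stringLengthCounter aString length → Spec_stringLengthCounter aString length (stringLengthCounter aString length)

-- ===== LEMMAS AND PROOFS =====

-- ===== VERDICT (by name: the statement is the Claim_ definition above) =====
theorem stringLengthCounterList_eq (s : List Char) (l : Int) :
    stringLengthCounterList s l = l + s.length := by
  induction hn : s.length using Nat.strong_induction_on generalizing s l with
  | _ n ih =>
    subst hn
    rw [stringLengthCounterList]
    split
    · simp_all
    · rename_i h
      simp only [PySem.List.slice_zero_start, PySem.List.slice_to_neg_one]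
      have hne : s ≠ [] := by simpa using h
      have h1 : s.dropLast.length = s.length - 1 := List.length_dropLast
      have h2 : 0 < s.length := List.length_pos_iff.mpr hne
      rw [ih s.dropLast.length (by omega) s.dropLast l rfl]
      omega

theorem stringLengthCounter_spec : Claim_equal_stringLengthCounter := by
  intro aString length _
  unfold Spec_stringLengthCounter stringLengthCounter stringLengthCounter_alt
  rw [stringLengthCounterList_eq]
  simp [PySem.Str.len]
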